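-- pv_equiv track=rewrite | github.com/pradeepagopinath19/MachineLearning | Assignment8/1b_knn_digits.py | compute_best_prediction
-- ===== SOURCE A (Python) =====
-- import operator
--
-- def compute_best_prediction(k_neighbors):
--     label_count = {}
--     for row in k_neighbors:
--         if row[-1] in label_count:
--             label_count[row[-1]] += 1
--         else:
--             label_count[row[-1]] = 1
--     best_prediction = sorted(label_count.items(), key=operator.itemgetter(1))
--     return best_prediction[0][0]
-- ===== SOURCE B (Python) =====
-- def compute_best_prediction(k_neighbors):
--     labels = [row[-1] for row in k_neighbors]
--     seen = []
--     for label in labels: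
--         if label not in seen:
--             seen.append(label)
--     return min(seen, key=labels.count)
-- ===== Notes on version B (the rewrite author's own statement) =====
-- stated objective: simpler
-- what changed: Instead of incrementally building a count dictionary and sorting its (label,count) items to take the first, B collects labels in first-occurrence order and picks the minimum directly with min(..., key=labels.count) - no dictionary and no sort, same first-minimal tie-breaking.
import Mathlib
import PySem

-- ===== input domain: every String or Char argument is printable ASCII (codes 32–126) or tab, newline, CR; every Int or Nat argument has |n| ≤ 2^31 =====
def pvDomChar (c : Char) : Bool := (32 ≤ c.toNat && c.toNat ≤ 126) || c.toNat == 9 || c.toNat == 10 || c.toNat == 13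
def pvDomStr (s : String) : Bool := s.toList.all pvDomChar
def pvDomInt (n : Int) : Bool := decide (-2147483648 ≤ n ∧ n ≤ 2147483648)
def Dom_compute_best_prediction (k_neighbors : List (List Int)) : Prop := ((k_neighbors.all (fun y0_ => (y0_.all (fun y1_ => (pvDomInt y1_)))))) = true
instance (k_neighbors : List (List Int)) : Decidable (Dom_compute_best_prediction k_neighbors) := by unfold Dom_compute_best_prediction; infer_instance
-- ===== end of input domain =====

-- B replaces A's sort-the-(label,count)-pairs-and-take-the-first selection by a direct
-- min-by-count over the labels in first-occurrence order (same tie-breaking, no sort).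

-- ===== PORT A =====
def compute_best_prediction (k_neighbors : List (List Int)) : Int :=
  let label_count := k_neighbors.foldl (fun d row =>
    match PySem.List.pyGet? row (-1) with        -- row[-1]; none = IndexError, excluded by Pre_
    | some l =>
        match PySem.Dict.get? d l with           -- 'if row[-1] in label_count'
        | some c => PySem.Dict.insert d l (c + 1)
        | none   => PySem.Dict.insert d l 1
    | none => d) (PySem.Dict.empty : PySem.Dict Int Int)
  let best_prediction := PySem.List.sorted label_count.items (fun p => p.2) false
  match PySem.List.pyGet? best_prediction 0 with -- best_prediction[0]; none = IndexError (empty input), excluded by Pre_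
  | some p => p.1
  | none   => 0

-- ===== PORT B =====
def compute_best_prediction_alt (k_neighbors : List (List Int)) : Int :=
  let labels := k_neighbors.map (fun row => (PySem.List.pyGet? row (-1)).getD 0)  -- row[-1]; the none/IndexError case is excluded by Pre_
  let seen := labels.foldl (fun s label => if s.contains label then s else s ++ [label]) []
  (PySem.List.min? seen (fun l => (PySem.List.count labels l : Int))).getD 0      -- min(seen, key=labels.count); empty = ValueError, excluded by Pre_

-- ===== PRECONDITION & SPEC =====
-- Pre_ excludes exactly the inputs on which the Python A raises: an empty k_neighbors
-- (IndexError on best_prediction[0]) and any empty row (IndexError on row[-1]).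
def Pre_compute_best_prediction (k_neighbors : List (List Int)) : Prop :=
  k_neighbors ≠ [] ∧ ∀ row ∈ k_neighbors, row ≠ []
instance (k_neighbors : List (List Int)) : Decidable (Pre_compute_best_prediction k_neighbors) := by unfold Pre_compute_best_prediction; infer_instance

def pvWitness_compute_best_prediction : List (List Int) := [[1, 2], [3, 2], [4, 7]]

def Spec_compute_best_prediction (k_neighbors : List (List Int)) (out : Int) : Prop := out = compute_best_prediction_alt k_neighbors
instance (k_neighbors : List (List Int)) (out : Int) : Decidable (Spec_compute_best_prediction k_neighbors out) := by unfold Spec_compute_best_prediction; infer_instance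

-- ===== CLAIM (what is proved, stated in full; the proofs are below) =====
def Claim_equal_compute_best_prediction : Prop := ∀ (k_neighbors : List (List Int)), Dom_compute_best_prediction k_neighbors → Pre_compute_best_prediction k_neighbors → Spec_compute_best_prediction k_neighbors (compute_best_prediction k_neighbors)

-- ===== LEMMAS AND PROOFS =====

-- row[-1] succeeds on a nonempty row
lemma pyGet_neg_one_isSome {α : Type} (row : List α) (h : row ≠ []) :
    ∃ l, PySem.List.pyGet? row (-1) = some l := by
  have hn : 0 < row.length := List.length_pos_iff.mpr h
  refine ⟨row[row.length - 1], ?_⟩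
  simp only [PySem.List.pyGet?, PySem.List.pyIdx?]
  have h0 : ¬ ((0 : Int) ≤ -1) := by norm_num
  have h1 : -(row.length : Int) ≤ -1 := by omega
  have h2 : ((-(-1) : Int)).toNat = 1 := by decide
  simp only [if_neg h0, if_pos h1, h2, Option.bind_some]
  exact List.getElem?_eq_getElem (by omega)

-- xs[0] is head?
lemma pyGet_zero_eq_head? {α : Type} (xs : List α) : PySem.List.pyGet? xs 0 = xs.head? := by
  cases xs <;> simp [PySem.List.pyGet?, PySem.List.pyIdx?]

-- first-minimum as an explicit fold (proof-side view of PySem.List.min?)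
def myMin {α κ : Type} [LT κ] [DecidableLT κ] (xs : List α) (key : α → κ) : Option α :=
  xs.foldl (fun m x => match m with
    | none => some x
    | some y => if key x < key y then some x else some y) none

lemma myMin_eq_min? {α κ : Type} [LT κ] [DecidableLT κ] (xs : List α) (key : α → κ) :
    myMin xs key = PySem.List.min? xs key := rfl

-- head of an insertBy step (for the strict-< ordering sorted uses)
lemma head?_insertBy {α κ : Type} [LT κ] [DecidableLT κ] (key : α → κ) (x : α) (acc : List α) :
    (PySem.List.insertBy (fun a b => decide (key a < key b)) x acc).head? =
      some (match acc.head? with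
            | none => x
            | some y => if key x < key y then x else y) := by
  cases acc with
  | nil => rfl
  | cons y ys =>
    simp only [PySem.List.insertBy, List.head?_cons]
    by_cases h : key x < key y
    · simp [h]
    · simp [h]

-- head of the insertion-sort fold is the running first-minimum fold
lemma head?_foldl_insertBy {α κ : Type} [LT κ] [DecidableLT κ] (key : α → κ) :
    ∀ (xs : List α) (acc : List α),
      (xs.foldl (fun a x => PySem.List.insertBy (fun a b => decide (key a < key b)) x a) acc).head? =
        xs.foldl (fun m x =>
          match m with
          | none => some x
          | some y => if key x < key y then some x else some y) acc.head? := by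
  intro xs
  induction xs with
  | nil => intro acc; rfl
  | cons x t ih =>
    intro acc
    simp only [List.foldl_cons]
    rw [ih, head?_insertBy]
    cases acc.head? with
    | none => rfl
    | some y => by_cases h : key x < key y <;> simp [h]

-- the first element of a stable sort is the first key-minimal element
lemma head?_sorted_eq_myMin {α κ : Type} [LT κ] [DecidableLT κ] (xs : List α) (key : α → κ) :
    (PySem.List.sorted xs key false).head? = myMin xs key := by
  rw [PySem.List.sorted_eq_foldl_insertBy]
  exact head?_foldl_insertBy key xs []

-- first-minimum over a mapped list
lemma myMin_map_aux {α β κ : Type} [LT κ] [DecidableLT κ] (f : α → β) (key : β → κ) :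
    ∀ (xs : List α) (acc : Option α),
      ((xs.map f).foldl (fun m x =>
          match m with
          | none => some x
          | some y => if key x < key y then some x else some y) (acc.map f)) =
        Option.map f (xs.foldl (fun m x =>
          match m with
          | none => some x
          | some y => if key (f x) < key (f y) then some x else some y) acc) := by
  intro xs
  induction xs with
  | nil => intro acc; rfl
  | cons x t ih =>
    intro acc
    simp only [List.map_cons, List.foldl_cons]
    cases acc with
    | none => exact ih (some x)
    | some y =>
      simp only [Option.map_some]
      by_cases h : key (f x) < key (f y)
      · simp only [if_pos h]; exact ih (some x)
      · simp only [if_neg h]; exact ih (some y)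

lemma myMin_map {α β κ : Type} [LT κ] [DecidableLT κ] (f : α → β) (key : β → κ) (xs : List α) :
    myMin (xs.map f) key = Option.map f (myMin xs (fun x => key (f x))) :=
  myMin_map_aux f key xs none

-- A's counting loop over the rows is Counter(labels), given nonempty rows
lemma dict_eq_counter (k_neighbors : List (List Int))
    (h : ∀ row ∈ k_neighbors, row ≠ []) :
    (k_neighbors.foldl (fun d row =>
      match PySem.List.pyGet? row (-1) with
      | some l =>
          match PySem.Dict.get? d l with
          | some c => PySem.Dict.insert d l (c + 1)
          | none   => PySem.Dict.insert d l 1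
      | none => d) (PySem.Dict.empty : PySem.Dict Int Int)) =
    PySem.Dict.counter (k_neighbors.map (fun row => (PySem.List.pyGet? row (-1)).getD 0)) := by
  rw [← PySem.Dict.foldl_insert_getD_add_one_eq_counter, List.foldl_map]
  apply PySem.List.foldl_congr_mem
  intro d row hrow
  obtain ⟨l, hl⟩ := pyGet_neg_one_isSome row (h row hrow)
  rw [hl]
  simp only [Option.getD_some]
  rw [PySem.Dict.getD_eq_get?_getD]
  cases hg : PySem.Dict.get? d l with
  | none => simp
  | some c => simp

theorem compute_best_prediction_spec : Claim_equal_compute_best_prediction := by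
  intro k_neighbors _hdom hpre
  obtain ⟨-, hrows⟩ := hpre
  simp only [Spec_compute_best_prediction, compute_best_prediction, compute_best_prediction_alt]
  rw [dict_eq_counter k_neighbors hrows]
  set labels := k_neighbors.map (fun row => (PySem.List.pyGet? row (-1)).getD 0) with hlabels
  rw [PySem.Dict.items_counter, pyGet_zero_eq_head?, head?_sorted_eq_myMin, myMin_map]
  have hseen : labels.foldl (fun s label => if s.contains label then s else s ++ [label]) [] =
      PySem.Set.ofList labels := by
    rw [PySem.Set.ofList_eq_foldl]
    apply PySem.List.foldl_congr_mem
    intro s x _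
    rfl
  rw [hseen, ← myMin_eq_min?]
  have hkey : (fun l => (PySem.List.count labels l : Int)) =
      (fun x : Int => ((x, (List.count x labels : Int)) : Int × Int).2) := by
    funext x
    simp [PySem.List.count_eq]
  rw [hkey]
  cases myMin (PySem.Set.ofList labels)
      (fun x : Int => ((x, (List.count x labels : Int)) : Int × Int).2) with
  | none => rfl
  | some m => rfl
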